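-- pv_equiv track=rewrite | github.com/daye-jjeong/daye-agent-toolkit | shared/life-coach/scripts/weekly_report.py | _build_raw_signals
-- ===== SOURCE A (Python) =====
-- def _esc(s: str) -> str:
--     return s.replace("&", "&amp;").replace("<", "&lt;").replace(">", "&gt;")
--
-- def _build_raw_signals(data: dict) -> str:
--     signals = data.get("weekly_signals", [])
--     repeated = data.get("repeated_patterns", [])
--     if not signals and not repeated:
--         return ""
--
--     by_type: dict[str, list[str]] = {}
--     for s in signals:
--         by_type.setdefault(s.get("type", "pattern"), []).append(s.get("content", ""))
--
--     type_config = {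
--         "mistake":  {"label": "시행착오", "cls": "sig-mistake"},
--         "decision": {"label": "결정", "cls": "sig-decision"},
--         "pattern":  {"label": "패턴", "cls": "sig-pattern"},
--     }
--
--     cards = []
--     for t, cfg in type_config.items():
--         items = by_type.get(t, [])
--         if not items:
--             continue
--         li = "".join(f'<div class="raw-item">{_esc(c)}</div>' for c in items)
--         cards.append(
--             f'<div class="raw-card {cfg["cls"]}">'
--             f'<div class="raw-hdr">{cfg["label"]} <span class="raw-count">{len(items)}</span></div>'
--             f'{li}</div>'
--         )
--
--     if repeated:
--         li = "".join(
--             f'<div class="raw-item raw-repeat-item">"{_esc(r["content"])}" ({r["count"]}회)</div>'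
--             for r in repeated
--         )
--         cards.append(
--             f'<div class="raw-card sig-repeat">'
--             f'<div class="raw-hdr">반복 패턴<span class="raw-sublabel">최근 7일</span></div>'
--             f'{li}</div>'
--         )
--
--     inner = "".join(cards)
--     return f"""<details class="raw-details">
-- <summary class="raw-summary">행동 신호 원시 데이터 ({len(signals)}건)</summary>
-- <div class="raw-grid">{inner}</div>
-- </details>"""
-- ===== SOURCE B (Python) =====
-- def _esc(s: str) -> str:
--     return s.replace("&", "&amp;").replace("<", "&lt;").replace(">", "&gt;")
--
-- def _card(cls: str, hdr: str, body: str) -> str: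
--     return f'<div class="raw-card {cls}"><div class="raw-hdr">{hdr}</div>{body}</div>'
--
-- def _type_card(signals, t, label, cls):
--     items = [s.get("content", "") for s in signals if s.get("type", "pattern") == t]
--     if not items:
--         return None
--     return _card(cls,
--                  f'{label} <span class="raw-count">{len(items)}</span>',
--                  "".join(f'<div class="raw-item">{_esc(c)}</div>' for c in items))
--
-- def _build_raw_signals(data: dict) -> str:
--     signals = data.get("weekly_signals", [])
--     repeated = data.get("repeated_patterns", [])
--     if not signals and not repeated:
--         return ""
--
--     cfg = (("mistake", "시행착오", "sig-mistake"),
--            ("decision", "결정", "sig-decision"),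
--            ("pattern", "패턴", "sig-pattern"))
--     cards = [c for c in (_type_card(signals, t, label, cls) for t, label, cls in cfg)
--              if c is not None]
--
--     if repeated:
--         cards.append(_card(
--             "sig-repeat",
--             '반복 패턴<span class="raw-sublabel">최근 7일</span>',
--             "".join(f'<div class="raw-item raw-repeat-item">"{_esc(r["content"])}" ({r["count"]}회)</div>'
--                     for r in repeated)))
--
--     return (f'<details class="raw-details">\n'
--             f'<summary class="raw-summary">행동 신호 원시 데이터 ({len(signals)}건)</summary>\n'
--             f'<div class="raw-grid">{"".join(cards)}</div>\n</details>')
-- ===== Notes on version B (the rewrite author's own statement) =====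
-- stated objective: simpler
-- what changed: B drops A's by_type grouping dict entirely and instead scans the signal list once per configured type (a filter+map per type), collecting cards with a shared _card helper.
import Mathlib
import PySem

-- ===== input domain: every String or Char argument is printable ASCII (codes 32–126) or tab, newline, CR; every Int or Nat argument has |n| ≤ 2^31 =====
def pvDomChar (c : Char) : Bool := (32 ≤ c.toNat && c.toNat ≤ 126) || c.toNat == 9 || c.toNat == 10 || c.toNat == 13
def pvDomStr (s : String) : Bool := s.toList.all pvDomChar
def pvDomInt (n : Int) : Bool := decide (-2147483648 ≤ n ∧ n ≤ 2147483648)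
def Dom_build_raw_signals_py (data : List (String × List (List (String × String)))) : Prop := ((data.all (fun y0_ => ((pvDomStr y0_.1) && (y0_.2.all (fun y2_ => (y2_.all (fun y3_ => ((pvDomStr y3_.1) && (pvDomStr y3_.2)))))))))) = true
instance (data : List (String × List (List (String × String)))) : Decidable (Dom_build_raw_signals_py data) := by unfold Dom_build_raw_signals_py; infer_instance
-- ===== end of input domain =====

-- B replaces A's grouping dict by a direct per-type scan of the signal list (same output, simpler decomposition).
-- Equivalence is over the RETURN value; neither program mutates its argument.

-- ===== PORT A =====
-- s.replace("&","&amp;").replace("<","&lt;").replace(">","&gt;")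
def pvEsc (s : String) : String :=
  PySem.Str.replace (PySem.Str.replace (PySem.Str.replace s "&" "&amp;") "<" "&lt;") ">" "&gt;"

-- d.get(k, dflt) on a dict-as-association-list (first match)
def pvGet (d : List (String × String)) (k dflt : String) : String :=
  (List.lookup k d).getD dflt

-- port of A: groups signals into a dict by type, then reads the dict per configured type
def build_raw_signals_py (data : List (String × List (List (String × String)))) : String :=
  let signals := (List.lookup "weekly_signals" data).getD []
  let repeated := (List.lookup "repeated_patterns" data).getD []
  if signals.isEmpty && repeated.isEmpty then "" else
  -- by_type.setdefault(s.get("type","pattern"), []).append(s.get("content","")) ≡ modify with default []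
  let by_type : PySem.Dict String (List String) :=
    signals.foldl (fun d s => d.modify (pvGet s "type" "pattern") [] (· ++ [pvGet s "content" ""]))
      PySem.Dict.empty
  let type_config : List (String × String × String) :=
    [("mistake", "시행착오", "sig-mistake"),
     ("decision", "결정", "sig-decision"),
     ("pattern", "패턴", "sig-pattern")]
  let cards := type_config.foldl (fun acc p =>
      let items := by_type.getD p.1 []
      if items.isEmpty then acc else
      let li := String.join (items.map (fun c => "<div class=\"raw-item\">" ++ pvEsc c ++ "</div>"))
      acc ++ ["<div class=\"raw-card " ++ p.2.2 ++ "\">" ++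
              "<div class=\"raw-hdr\">" ++ p.2.1 ++ " <span class=\"raw-count\">" ++
              PySem.Int.toStr (items.length : Int) ++ "</span></div>" ++ li ++ "</div>"]) []
  let cards := if repeated.isEmpty then cards else
      -- r["content"], r["count"]: Pre_ guarantees both keys are present (KeyError otherwise)
      let li := String.join (repeated.map (fun r =>
        "<div class=\"raw-item raw-repeat-item\">\"" ++ pvEsc (pvGet r "content" "") ++ "\" (" ++
        pvGet r "count" "" ++ "회)</div>"))
      cards ++ ["<div class=\"raw-card sig-repeat\">" ++
                "<div class=\"raw-hdr\">반복 패턴<span class=\"raw-sublabel\">최근 7일</span></div>" ++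
                li ++ "</div>"]
  let inner := String.join cards
  "<details class=\"raw-details\">\n<summary class=\"raw-summary\">행동 신호 원시 데이터 (" ++
    PySem.Int.toStr (signals.length : Int) ++ "건)</summary>\n<div class=\"raw-grid\">" ++
    inner ++ "</div>\n</details>"

-- ===== PORT B =====
-- _card(cls, hdr, body)
def pvCard (cls hdr body : String) : String :=
  "<div class=\"raw-card " ++ cls ++ "\"><div class=\"raw-hdr\">" ++ hdr ++ "</div>" ++ body ++ "</div>"

-- _type_card: scan the full signal list for one type; None when no item has that type
def pvTypeCard (signals : List (List (String × String))) (t label cls : String) : Option String :=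
  let items := (signals.filter (fun s => pvGet s "type" "pattern" == t)).map (fun s => pvGet s "content" "")
  if items.isEmpty then none else
  some (pvCard cls
    (label ++ " <span class=\"raw-count\">" ++ PySem.Int.toStr (items.length : Int) ++ "</span>")
    (String.join (items.map (fun c => "<div class=\"raw-item\">" ++ pvEsc c ++ "</div>"))))

-- port of B: no dict; one direct scan per configured type, cards collected by filterMap
def build_raw_signals_py_alt (data : List (String × List (List (String × String)))) : String :=
  let signals := (List.lookup "weekly_signals" data).getD []
  let repeated := (List.lookup "repeated_patterns" data).getD []
  if signals.isEmpty && repeated.isEmpty then "" else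
  let cfg : List (String × String × String) :=
    [("mistake", "시행착오", "sig-mistake"),
     ("decision", "결정", "sig-decision"),
     ("pattern", "패턴", "sig-pattern")]
  let cards := cfg.filterMap (fun p => pvTypeCard signals p.1 p.2.1 p.2.2)
  let cards := if repeated.isEmpty then cards else
      cards ++ [pvCard "sig-repeat" "반복 패턴<span class=\"raw-sublabel\">최근 7일</span>"
        (String.join (repeated.map (fun r =>
          "<div class=\"raw-item raw-repeat-item\">\"" ++ pvEsc (pvGet r "content" "") ++ "\" (" ++
          pvGet r "count" "" ++ "회)</div>")))]
  "<details class=\"raw-details\">\n<summary class=\"raw-summary\">행동 신호 원시 데이터 (" ++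
    PySem.Int.toStr (signals.length : Int) ++ "건)</summary>\n<div class=\"raw-grid\">" ++
    String.join cards ++ "</div>\n</details>"

-- ===== PRECONDITION & SPEC =====
-- Pre_ excludes only inputs where A raises KeyError: a repeated-pattern entry missing "content" or "count".
def Pre_build_raw_signals_py (data : List (String × List (List (String × String)))) : Prop :=
  (((List.lookup "repeated_patterns" data).getD []).all
    (fun r => (List.lookup "content" r).isSome && (List.lookup "count" r).isSome)) = true
instance (data : List (String × List (List (String × String)))) : Decidable (Pre_build_raw_signals_py data) := by unfold Pre_build_raw_signals_py; infer_instance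

def pvWitness_build_raw_signals_py : (List (String × List (List (String × String)))) :=
  [("weekly_signals", [[("type", "mistake"), ("content", "a&b")], [("content", "x")]]),
   ("repeated_patterns", [[("content", "late"), ("count", "3")]])]

def Spec_build_raw_signals_py (data : List (String × List (List (String × String)))) (out : String) : Prop := out = build_raw_signals_py_alt data
instance (data : List (String × List (List (String × String)))) (out : String) : Decidable (Spec_build_raw_signals_py data out) := by unfold Spec_build_raw_signals_py; infer_instance

-- ===== CLAIM (what is proved, stated in full; the proofs are below) =====
def Claim_equal_build_raw_signals_py : Prop := ∀ (data : List (String × List (List (String × String)))), Dom_build_raw_signals_py data → Pre_build_raw_signals_py data → Spec_build_raw_signals_py data (build_raw_signals_py data)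

-- ===== LEMMAS AND PROOFS =====

-- A's grouping dict, read at type t, is exactly B's direct scan for t.
theorem byType_getD_eq (signals : List (List (String × String))) (t : String) :
    (signals.foldl (fun d s => d.modify (pvGet s "type" "pattern") [] (· ++ [pvGet s "content" ""]))
      (PySem.Dict.empty : PySem.Dict String (List String))).getD t []
    = (signals.filter (fun s => pvGet s "type" "pattern" == t)).map (fun s => pvGet s "content" "") := by
  have h := PySem.Dict.getD_foldl_modify_append
    (signals.map (fun s => (pvGet s "type" "pattern", pvGet s "content" "")))
    (PySem.Dict.empty : PySem.Dict String (List String)) t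
  rw [List.foldl_map] at h
  simpa [List.filter_map, Function.comp, List.map_map] using h

-- merges the two closing-tag literals that B's hdr/body split leaves adjacent
theorem pv_span_div (x : String) : x ++ "</span>" ++ "</div>" = x ++ "</span></div>" := by
  rw [String.append_assoc]; rfl

set_option maxHeartbeats 1000000 in
theorem build_raw_signals_py_spec : Claim_equal_build_raw_signals_py := by
  intro data _ _
  unfold Spec_build_raw_signals_py build_raw_signals_py build_raw_signals_py_alt
  simp only [byType_getD_eq, List.foldl_cons, List.foldl_nil, List.filterMap_cons,
    List.filterMap_nil, pvTypeCard]
  split_ifs <;> simp [pvCard, ← String.append_assoc, pv_span_div]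

-- ===== VERDICT (by name: the statement is the Claim_ definition above) =====
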